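-- pv_equiv track=rewrite | github.com/RafailSkoulos17/cyber_data_analytics | anomaly_detection/comparison.py | check_first_occurrence
-- ===== SOURCE A (Python) =====
-- def check_first_occurrence(predicted, anomaly_blocks):
--     """
--     Function that checks when was an attack firstly identified and returns the number of attacks
--     identified and the time at which they were identified. Even if we have a positive label during an
--     attack, we consider this attack as identified
--     :param predicted: the predicted labels of the time series
--     :param anomaly_blocks: the block of each attack
--     :return: the number of attacks identified and the time at which each attack was identified
--     """
--     attacks = 0
--     time_init = {}
--     for ind, p in enumerate(predicted):
--         if p == 1:
--             # check if the positive label is within an actual attack block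
--             membership = list(map(lambda x: x[0] <= ind < x[1], anomaly_blocks))
--             if True in membership:
--                 if membership.index(True) not in time_init.keys():  # if the attack hasn't been identified before
--                     time_init[membership.index(True)] = ind  # store the time of identification
--                     attacks += 1  # and increase the attack counter
--     return attacks, time_init
-- ===== SOURCE B (Python) =====
-- def _fill(owner, j, a, b):
--     # mark every in-range time index of block j as owned by j
--     for ind in range(max(a, 0), min(b, len(owner))):
--         owner[ind] = j
--
--
-- def check_first_occurrence(predicted, anomaly_blocks):
--     # Precompute, once, which attack block (the first containing one) owns each
--     # time index; then a single pass over the labels records first detections.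
--     owner = [None] * len(predicted)
--     for j, (a, b) in reversed(list(enumerate(anomaly_blocks))):
--         _fill(owner, j, a, b)
--     attacks = 0
--     time_init = {}
--     for ind, p in enumerate(predicted):
--         if p == 1:
--             j = owner[ind]
--             if j is not None and j not in time_init:
--                 time_init[j] = ind
--                 attacks += 1
--     return attacks, time_init
-- ===== Notes on version B (the rewrite author's own statement) =====
-- stated objective: alternative
-- what changed: Instead of rebuilding and scanning the full membership list of all blocks for every positive label, B precomputes once (iterating blocks in reverse so the first containing block wins) an owner table mapping each time index to its first containing block, then records first detections in a single pass over the labels.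
import Mathlib
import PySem

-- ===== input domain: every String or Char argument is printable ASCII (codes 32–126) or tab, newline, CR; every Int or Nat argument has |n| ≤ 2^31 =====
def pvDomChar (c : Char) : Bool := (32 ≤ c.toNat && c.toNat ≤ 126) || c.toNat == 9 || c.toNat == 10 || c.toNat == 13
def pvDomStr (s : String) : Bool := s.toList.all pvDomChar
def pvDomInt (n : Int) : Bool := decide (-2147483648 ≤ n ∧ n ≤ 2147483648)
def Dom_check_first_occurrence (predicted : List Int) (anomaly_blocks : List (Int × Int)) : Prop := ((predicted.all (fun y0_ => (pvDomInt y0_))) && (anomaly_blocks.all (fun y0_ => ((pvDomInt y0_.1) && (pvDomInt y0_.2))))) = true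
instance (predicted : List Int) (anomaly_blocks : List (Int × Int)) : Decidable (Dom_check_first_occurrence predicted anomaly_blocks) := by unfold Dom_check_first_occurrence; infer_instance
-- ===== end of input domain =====

-- B precomputes an "owner" table (first containing block per time index) once, replacing A's
-- per-positive-label scan of all blocks (a different algorithm; equivalence is proved below).

-- ===== PORT A =====
def check_first_occurrence (predicted : List Int) (anomaly_blocks : List (Int × Int)) : Int × (List (Int × Int)) :=
  let r := (PySem.List.enumerate predicted 0).foldl
    (fun (st : Int × PySem.Dict Int Int) (ip : Int × Int) =>
      if ip.2 == 1 then
        let membership := anomaly_blocks.map (fun x => decide (x.1 ≤ ip.1 ∧ ip.1 < x.2))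
        if true ∈ membership then
          match PySem.List.index? membership true with
          | some k =>
            if st.2.contains (k : Int) then st
            else (st.1 + 1, st.2.insert (k : Int) ip.1)
          | none => st   -- unreachable: guarded by 'True in membership'
        else st
      else st)
    (0, PySem.Dict.empty)
  (r.1, r.2.items)

-- ===== PORT B =====
-- _fill: owner[ind] = j for ind in range(max(a,0), min(b,len(owner))); every generated
-- index is in range, so pySetD is exact for the assignment.
def fillOwner (owner : List (Option Int)) (j a b : Int) : List (Option Int) :=
  (PySem.List.pyRange (max a 0) (min b (owner.length : Int)) 1).foldl
    (fun o ind => PySem.List.pySetD o ind (some j)) owner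

def check_first_occurrence_alt (predicted : List Int) (anomaly_blocks : List (Int × Int)) : Int × (List (Int × Int)) :=
  let owner : List (Option Int) :=
    (PySem.List.enumerate anomaly_blocks 0).reverse.foldl
      (fun o jab => fillOwner o jab.1 jab.2.1 jab.2.2)
      (List.replicate predicted.length none)
  let r := (PySem.List.enumerate predicted 0).foldl
    (fun (st : Int × PySem.Dict Int Int) (ip : Int × Int) =>
      if ip.2 == 1 then
        -- owner[ind]: ind is an enumerate index, always in range, so pyGetD is exact
        match PySem.List.pyGetD owner ip.1 none with
        | some j =>
          if st.2.contains j then st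
          else (st.1 + 1, st.2.insert j ip.1)
        | none => st
      else st)
    (0, PySem.Dict.empty)
  (r.1, r.2.items)

-- ===== PRECONDITION & SPEC =====
def Spec_check_first_occurrence (predicted : List Int) (anomaly_blocks : List (Int × Int)) (out : Int × (List (Int × Int))) : Prop := out = check_first_occurrence_alt predicted anomaly_blocks
instance (predicted : List Int) (anomaly_blocks : List (Int × Int)) (out : Int × (List (Int × Int))) : Decidable (Spec_check_first_occurrence predicted anomaly_blocks out) := by unfold Spec_check_first_occurrence; infer_instance

-- ===== CLAIM (what is proved, stated in full; the proofs are below) =====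
def Claim_equal_check_first_occurrence : Prop := ∀ (predicted : List Int) (anomaly_blocks : List (Int × Int)), Dom_check_first_occurrence predicted anomaly_blocks → Spec_check_first_occurrence predicted anomaly_blocks (check_first_occurrence predicted anomaly_blocks)

-- ===== LEMMAS AND PROOFS =====

-- the index of the first block containing time index `ind`, exactly as A computes it
def firstHit (blocks : List (Int × Int)) (ind : Int) : Option Nat :=
  PySem.List.index? (blocks.map (fun x => decide (x.1 ≤ ind ∧ ind < x.2))) true

lemma foldl_setD_length (l : List Int) (o : List (Option Int)) (v : Option Int) :
    (l.foldl (fun o i => PySem.List.pySetD o i v) o).length = o.length := by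
  induction l generalizing o with
  | nil => rfl
  | cons i l ih => simp [List.foldl_cons, ih, PySem.List.length_pySetD]

lemma foldl_setD_get (l : List Int) (hl : ∀ i ∈ l, 0 ≤ i) (o : List (Option Int))
    (v : Option Int) (k : Nat) :
    (l.foldl (fun o i => PySem.List.pySetD o i v) o)[k]? =
      if (k : Int) ∈ l ∧ k < o.length then some v else o[k]? := by
  induction l generalizing o with
  | nil => simp
  | cons i l ih =>
    have hi : 0 ≤ i := hl i (List.mem_cons_self ..)
    rw [List.foldl_cons, ih (fun x hx => hl x (List.mem_cons_of_mem _ hx)),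
        PySem.List.pySetD_of_nonneg o v hi]
    by_cases hk : k < o.length
    · by_cases hkl : (k : Int) ∈ l
      · simp [hkl, hk]
      · by_cases hik : i = (k : Int)
        · have h3 : i.toNat = k := by omega
          simp [hkl, hik, hk]
        · have h3 : i.toNat ≠ k := by omega
          have h6 : ¬ (k : Int) = i := fun h => hik h.symm
          simp [hkl, h6, h3]
    · have h4 : o[k]? = none := List.getElem?_eq_none (by omega)
      have h5 : (o.set i.toNat v)[k]? = none := List.getElem?_eq_none (by simp; omega)
      simp [hk]

lemma fillOwner_length (o : List (Option Int)) (j a b : Int) :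
    (fillOwner o j a b).length = o.length := by
  simp [fillOwner, foldl_setD_length]

lemma fillOwner_get (o : List (Option Int)) (j a b : Int) (k : Nat) (hk : k < o.length) :
    (fillOwner o j a b)[k]? =
      if a ≤ (k : Int) ∧ (k : Int) < b then some (some j) else o[k]? := by
  rw [fillOwner, foldl_setD_get _ (fun i hi => by
        have := (PySem.List.mem_pyRange_one).1 hi; omega)]
  have hmem : ((k : Int) ∈ PySem.List.pyRange (max a 0) (min b (o.length : Int)) 1) ↔
      (a ≤ (k : Int) ∧ (k : Int) < b) := by
    rw [PySem.List.mem_pyRange_one]; omega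
  by_cases h : a ≤ (k : Int) ∧ (k : Int) < b
  · rw [if_pos ⟨hmem.2 h, hk⟩, if_pos h]
  · rw [if_neg (fun hc => h (hmem.1 hc.1)), if_neg h]

lemma buildOwner_length (L : List (Int × (Int × Int))) (o : List (Option Int)) :
    (L.foldl (fun o jab => fillOwner o jab.1 jab.2.1 jab.2.2) o).length = o.length := by
  induction L generalizing o with
  | nil => rfl
  | cons y L ihl => simp [List.foldl_cons, ihl, fillOwner_length]

lemma buildOwner_get (blocks : List (Int × Int)) (s : Int) (o : List (Option Int)) (k : Nat) :
    ((PySem.List.enumerate blocks s).reverse.foldl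
        (fun o jab => fillOwner o jab.1 jab.2.1 jab.2.2) o)[k]? =
      match firstHit blocks (k : Int) with
      | some i => if k < o.length then some (some (s + (i : Int))) else o[k]?
      | none => o[k]? := by
  induction blocks generalizing s o with
  | nil => simp [firstHit]
  | cons x xs ih =>
    rw [PySem.List.enumerate_cons, List.reverse_cons, List.foldl_concat]
    have hO := buildOwner_length (PySem.List.enumerate xs (s + 1)).reverse o
    by_cases hk : k < o.length
    · rw [show ((s, x).1 : Int) = s from rfl]
      rw [fillOwner_get _ _ _ _ k (by rw [hO]; exact hk), ih]
      by_cases hx : x.1 ≤ (k : Int) ∧ (k : Int) < x.2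
      · have hfh : firstHit (x :: xs) (k : Int) = some 0 := by
          simp only [firstHit, List.map_cons]
          rw [show decide (x.1 ≤ (k:Int) ∧ (k:Int) < x.2) = true by simpa using hx]
          exact PySem.List.index?_cons_self true _
        simp [hfh, hx, hk]
      · have hhead : decide (x.1 ≤ (k:Int) ∧ (k:Int) < x.2) ≠ true := by simpa using hx
        have hfh : firstHit (x :: xs) (k : Int) = (firstHit xs (k : Int)).map (· + 1) := by
          simp only [firstHit, List.map_cons]
          exact PySem.List.index?_cons_of_ne _ hhead
        rw [if_neg hx, hfh]
        cases h : firstHit xs (k : Int) with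
        | none => simp
        | some i =>
          simp only [Option.map_some, hk, if_pos]
          congr 2
          push_cast
          ring
    · have hnone : ((fillOwner ((PySem.List.enumerate xs (s + 1)).reverse.foldl
          (fun o jab => fillOwner o jab.1 jab.2.1 jab.2.2) o) (s, x).1 (s, x).2.1 (s, x).2.2))[k]? = none := by
        apply List.getElem?_eq_none
        rw [fillOwner_length, hO]; omega
      have honone : o[k]? = none := List.getElem?_eq_none (by omega)
      rw [hnone]
      cases h : firstHit (x :: xs) (k : Int) <;> simp [hk]

lemma owner_lookup (predicted : List Int) (anomaly_blocks : List (Int × Int))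
    (k : Nat) (hk : k < predicted.length) :
    PySem.List.pyGetD
      ((PySem.List.enumerate anomaly_blocks 0).reverse.foldl
        (fun o jab => fillOwner o jab.1 jab.2.1 jab.2.2)
        (List.replicate predicted.length (none : Option Int))) (k : Int) none =
      (firstHit anomaly_blocks (k : Int)).map (fun i => (i : Int)) := by
  have hget := buildOwner_get anomaly_blocks 0 (List.replicate predicted.length (none : Option Int)) k
  have hlen := buildOwner_length (PySem.List.enumerate anomaly_blocks 0).reverse
    (List.replicate predicted.length (none : Option Int))
  simp only [List.length_replicate] at hlen
  rw [PySem.List.pyGetD_eq_getElem _ _ (by positivity) (by rw [hlen]; exact_mod_cast hk)]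
  have h2 := List.getElem?_eq_getElem
    (l := (PySem.List.enumerate anomaly_blocks 0).reverse.foldl
      (fun o jab => fillOwner o jab.1 jab.2.1 jab.2.2)
      (List.replicate predicted.length (none : Option Int)))
    (i := (k : Int).toNat) (by rw [hlen]; simpa using hk)
  simp only [Int.toNat_natCast] at h2 ⊢
  rw [hget] at h2
  cases h : firstHit anomaly_blocks (k : Int) with
  | none =>
    simp only [h, List.getElem?_replicate, hk, if_pos,
      Option.some.injEq] at h2
    simpa [h] using h2.symm
  | some i =>
    simp only [h, List.length_replicate, hk, if_pos, Option.some.injEq] at h2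
    simpa [h] using h2.symm

-- ===== VERDICT (by name: the statement is the Claim_ definition above) =====
theorem check_first_occurrence_spec : Claim_equal_check_first_occurrence := by
  intro predicted anomaly_blocks _
  have hstep : ∀ (st : Int × PySem.Dict Int Int), ∀ ip ∈ PySem.List.enumerate predicted 0,
      (fun (st : Int × PySem.Dict Int Int) (ip : Int × Int) =>
        if ip.2 == 1 then
          let membership := anomaly_blocks.map (fun x => decide (x.1 ≤ ip.1 ∧ ip.1 < x.2))
          if true ∈ membership then
            match PySem.List.index? membership true with
            | some k =>
              if st.2.contains (k : Int) then st
              else (st.1 + 1, st.2.insert (k : Int) ip.1)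
            | none => st
          else st
        else st) st ip =
      (fun (st : Int × PySem.Dict Int Int) (ip : Int × Int) =>
        if ip.2 == 1 then
          match PySem.List.pyGetD
              ((PySem.List.enumerate anomaly_blocks 0).reverse.foldl
                (fun o jab => fillOwner o jab.1 jab.2.1 jab.2.2)
                (List.replicate predicted.length none)) ip.1 none with
          | some j =>
            if st.2.contains j then st
            else (st.1 + 1, st.2.insert j ip.1)
          | none => st
        else st) st ip := by
    intro st ip hip
    obtain ⟨k, hk, rfl⟩ := (PySem.List.mem_enumerate_iff predicted 0 ip).1 hip
    simp only [zero_add]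
    by_cases hp : predicted[k] == 1
    · simp only [hp, if_pos]
      rw [owner_lookup predicted anomaly_blocks k hk]
      cases h : PySem.List.index?
          (anomaly_blocks.map (fun x => decide (x.1 ≤ (k:Int) ∧ (k:Int) < x.2))) true with
      | none =>
        have hmem : true ∉ anomaly_blocks.map (fun x => decide (x.1 ≤ (k:Int) ∧ (k:Int) < x.2)) :=
          (PySem.List.index?_eq_none_iff _ _).1 h
        have hfh : firstHit anomaly_blocks (k:Int) = none := h
        simp only [hfh, if_neg hmem]
        rfl
      | some j =>
        have hmem : true ∈ anomaly_blocks.map (fun x => decide (x.1 ≤ (k:Int) ∧ (k:Int) < x.2)) := by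
          rw [← PySem.List.index?_isSome_iff
            (anomaly_blocks.map (fun x => decide (x.1 ≤ (k:Int) ∧ (k:Int) < x.2))) true]
          rw [h]; rfl
        have hfh : firstHit anomaly_blocks (k:Int) = some j := h
        simp only [hfh, if_pos hmem]
        rfl
    · simp [hp]
  exact congrArg (fun r : Int × PySem.Dict Int Int => (r.1, r.2.items))
    (PySem.List.foldl_congr_mem (PySem.List.enumerate predicted 0) _ _
      ((0 : Int), PySem.Dict.empty) hstep)
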